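-- pv_equiv track=rewrite | github.com/dephan0/Advent-Of-Code-2022 | day8/task1and2.py | get_visibility
-- ===== SOURCE A (Python) =====
-- def get_visibility(trees):
--     rows = len(trees)
--     columns = len(trees[0])
--     visibility_dict = {'top' : False, 'bottom': False, 'left' : False, 'right' : False}
--     visibility = [ [ visibility_dict.copy() for _ in range(columns) ] for _ in range(rows) ]
--
--     # check on the left
--     for i in range(rows):
--         max = trees[i][0]
--         visibility[i][0]['left'] = True
--         for j in range(1, columns):
--             if trees[i][j] > max:
--                 max = trees[i][j]
--                 visibility[i][j]['left'] = True
--             else: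
--                 visibility[i][j]['left'] = False
--
--     # check on the right
--     for i in range(rows):
--         last_ind = columns - 1
--         max = trees[i][last_ind]
--         visibility[i][last_ind]['right'] = True
--         for j in range(last_ind - 1, -1, -1):
--             if trees[i][j] > max:
--                 max = trees[i][j]
--                 visibility[i][j]['right'] = True
--             else:
--                 visibility[i][j]['right'] = False
--
--     # check on the top
--     for j in range(columns):
--         max = trees[0][j]
--         visibility[0][j]['top'] = True
--         for i in range(1, rows):
--             if trees[i][j] > max:
--                 max = trees[i][j]
--                 visibility[i][j]['top'] = True
--             else:
--                 visibility[i][j]['top'] = False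
--
--     # check on the bottom
--     for j in range(columns):
--         last_ind = rows - 1
--         max = trees[last_ind][j]
--         visibility[last_ind][j]['bottom'] = True
--         for i in range(last_ind - 1, -1, -1):
--             if trees[i][j] > max:
--                 max = trees[i][j]
--                 visibility[i][j]['bottom'] = True
--             else:
--                 visibility[i][j]['bottom'] = False
--
--     return visibility
-- ===== SOURCE B (Python) =====
-- def get_visibility(trees):
--     rows = len(trees)
--     cols = len(trees[0])
--
--     def taller(h, others):
--         # a tree is visible from a side iff it strictly exceeds every tree on that side
--         # (vacuously true at an edge)
--         return all(x < h for x in others)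
--
--     return [[{'top':    taller(trees[i][j], [trees[k][j] for k in range(i)]),
--               'bottom': taller(trees[i][j], [trees[k][j] for k in range(i + 1, rows)]),
--               'left':   taller(trees[i][j], trees[i][:j]),
--               'right':  taller(trees[i][j], trees[i][j + 1:cols])}
--              for j in range(cols)]
--             for i in range(rows)]
-- ===== Notes on version B (the rewrite author's own statement) =====
-- stated objective: simpler
-- what changed: Replaces the four stateful running-max sweeps mutating a shared grid of dicts by a direct per-cell definition: each cell's dict is built in one expression by brute-force checking that the tree strictly exceeds every tree on each of the four sides (all(x < h)), with no running maxima, no tables and no mutation.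
import Mathlib
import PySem

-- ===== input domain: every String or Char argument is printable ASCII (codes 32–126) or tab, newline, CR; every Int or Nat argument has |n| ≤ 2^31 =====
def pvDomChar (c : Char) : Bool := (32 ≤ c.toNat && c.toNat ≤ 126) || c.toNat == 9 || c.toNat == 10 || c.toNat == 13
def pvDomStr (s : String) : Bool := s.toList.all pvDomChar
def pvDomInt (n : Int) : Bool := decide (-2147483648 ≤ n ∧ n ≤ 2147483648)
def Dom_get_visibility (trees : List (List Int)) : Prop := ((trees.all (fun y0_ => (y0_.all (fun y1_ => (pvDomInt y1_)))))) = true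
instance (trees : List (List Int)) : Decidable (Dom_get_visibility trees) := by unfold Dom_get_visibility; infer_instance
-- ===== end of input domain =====

-- B replaces A's four stateful running-max sweeps over a mutated grid of dicts by a direct per-cell brute-force check (strictly taller than every tree on each side); simpler, not faster; proved equal on all inputs where A returns.


-- ===== PORT A =====
-- visibility[i][j][key] = b  (indices come from range(); they are ≥ 0 and in bounds under Pre_, so .toNat is exact there)
def pvGset (g : List (List (PySem.Dict String Bool))) (i j : Int) (key : String) (b : Bool) :
    List (List (PySem.Dict String Bool)) :=
  g.modify i.toNat (fun row => row.modify j.toNat (fun d => d.insert key b))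

-- trees[i][j]  (in bounds under Pre_, so the default is never returned there)
def pvTget (trees : List (List Int)) (i j : Int) : Int :=
  PySem.List.pyGetD (PySem.List.pyGetD trees i []) j 0

def get_visibility (trees : List (List Int)) : List (List (List (String × Bool))) :=
  let rows : Int := PySem.List.len trees
  let columns : Int := PySem.List.len (PySem.List.pyGetD trees 0 [])
  -- visibility = [[visibility_dict.copy() for _ in range(columns)] for _ in range(rows)]
  let visibility : List (List (PySem.Dict String Bool)) :=
    (PySem.List.pyRange 0 rows 1).map (fun _ =>
      (PySem.List.pyRange 0 columns 1).map (fun _ =>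
        PySem.Dict.ofList [("top", false), ("bottom", false), ("left", false), ("right", false)]))
  -- check on the left
  let visibility := (PySem.List.pyRange 0 rows 1).foldl (fun g i =>
    ((PySem.List.pyRange 1 columns 1).foldl
        (fun (p : List (List (PySem.Dict String Bool)) × Int) j =>
          if pvTget trees i j > p.2 then (pvGset p.1 i j "left" true, pvTget trees i j)
          else (pvGset p.1 i j "left" false, p.2))
        (pvGset g i 0 "left" true, pvTget trees i 0)).1) visibility
  -- check on the right
  let visibility := (PySem.List.pyRange 0 rows 1).foldl (fun g i =>
    ((PySem.List.pyRange (columns - 1 - 1) (-1) (-1)).foldl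
        (fun (p : List (List (PySem.Dict String Bool)) × Int) j =>
          if pvTget trees i j > p.2 then (pvGset p.1 i j "right" true, pvTget trees i j)
          else (pvGset p.1 i j "right" false, p.2))
        (pvGset g i (columns - 1) "right" true, pvTget trees i (columns - 1))).1) visibility
  -- check on the top
  let visibility := (PySem.List.pyRange 0 columns 1).foldl (fun g j =>
    ((PySem.List.pyRange 1 rows 1).foldl
        (fun (p : List (List (PySem.Dict String Bool)) × Int) i =>
          if pvTget trees i j > p.2 then (pvGset p.1 i j "top" true, pvTget trees i j)
          else (pvGset p.1 i j "top" false, p.2))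
        (pvGset g 0 j "top" true, pvTget trees 0 j)).1) visibility
  -- check on the bottom
  let visibility := (PySem.List.pyRange 0 columns 1).foldl (fun g j =>
    ((PySem.List.pyRange (rows - 1 - 1) (-1) (-1)).foldl
        (fun (p : List (List (PySem.Dict String Bool)) × Int) i =>
          if pvTget trees i j > p.2 then (pvGset p.1 i j "bottom" true, pvTget trees i j)
          else (pvGset p.1 i j "bottom" false, p.2))
        (pvGset g (rows - 1) j "bottom" true, pvTget trees (rows - 1) j)).1) visibility
  visibility.map (fun row => row.map PySem.Dict.items)

-- ===== PORT B =====
-- taller(h, others): all(x < h for x in others)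
def pvTaller (h : Int) (others : List Int) : Bool := others.all (fun x => decide (x < h))

-- Source B's comprehension, cell by cell; the slices trees[i][:j] and trees[i][j+1:cols] have
-- non-negative bounds, so they are exactly take/drop; indices are in bounds under Pre_,
-- so getD is exact there.
def get_visibility_alt (trees : List (List Int)) : List (List (List (String × Bool))) :=
  let rows := trees.length
  let cols := (PySem.List.pyGetD trees 0 []).length
  (List.range rows).map (fun i => (List.range cols).map (fun j =>
    [("top",    pvTaller ((trees.getD i []).getD j 0)
                  ((List.range i).map (fun k => (trees.getD k []).getD j 0))),
     ("bottom", pvTaller ((trees.getD i []).getD j 0)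
                  ((List.range' (i + 1) (rows - (i + 1))).map (fun k => (trees.getD k []).getD j 0))),
     ("left",   pvTaller ((trees.getD i []).getD j 0) ((trees.getD i []).take j)),
     ("right",  pvTaller ((trees.getD i []).getD j 0) (((trees.getD i []).take cols).drop (j + 1)))]))

-- ===== PRECONDITION & SPEC =====
-- Pre_ excludes exactly the inputs where the Python A raises an IndexError: the empty grid,
-- a first row that is empty, and grids where some row is shorter than the first row.
def Pre_get_visibility (trees : List (List Int)) : Prop :=
  trees ≠ [] ∧ 0 < (PySem.List.pyGetD trees 0 []).length ∧
    ∀ row ∈ trees, (PySem.List.pyGetD trees 0 []).length ≤ row.length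
instance (trees : List (List Int)) : Decidable (Pre_get_visibility trees) := by
  unfold Pre_get_visibility; infer_instance

def pvWitness_get_visibility : List (List Int) := [[3, 0, 3], [2, 5, 5], [6, 5, 3]]

def Spec_get_visibility (trees : List (List Int)) (out : List (List (List (String × Bool)))) : Prop := out = get_visibility_alt trees
instance (trees : List (List Int)) (out : List (List (List (String × Bool)))) : Decidable (Spec_get_visibility trees out) := by unfold Spec_get_visibility; infer_instance

-- ===== CLAIM (what is proved, stated in full; the proofs are below) =====
def Claim_equal_get_visibility : Prop := ∀ (trees : List (List Int)), Dom_get_visibility trees → Pre_get_visibility trees → Spec_get_visibility trees (get_visibility trees)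

-- ===== LEMMAS AND PROOFS =====

-- ---- proof-side helper definitions ----

-- number of columns A and B read: len(trees[0])
def pvCols (trees : List (List Int)) : Nat := (PySem.List.pyGetD trees 0 []).length

def pvMaxD (xs : List Int) : Int := xs.max?.getD 0

def pvT (trees : List (List Int)) (a b : Nat) : Int := (trees.getD a []).getD b 0

def pvColL (trees : List (List Int)) (b : Nat) : List Int := trees.map (fun row => row.getD b 0)

def pvFL (trees : List (List Int)) (a b : Nat) : Bool :=
  b == 0 || decide (pvT trees a b > pvMaxD ((trees.getD a []).take b))
def pvFR (trees : List (List Int)) (a b : Nat) : Bool :=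
  b == pvCols trees - 1 ||
    decide (pvT trees a b > pvMaxD (((trees.getD a []).take (pvCols trees)).drop (b + 1)))
def pvFT (trees : List (List Int)) (a b : Nat) : Bool :=
  a == 0 || decide (pvT trees a b > pvMaxD ((pvColL trees b).take a))
def pvFB (trees : List (List Int)) (a b : Nat) : Bool :=
  a == trees.length - 1 || decide (pvT trees a b > pvMaxD ((pvColL trees b).drop (a + 1)))

-- the common normal form both programs are reduced to
def pvRHS (trees : List (List Int)) : List (List (List (String × Bool))) :=
  (List.range trees.length).map (fun a => (List.range (pvCols trees)).map (fun b =>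
    [("top", pvFT trees a b), ("bottom", pvFB trees a b),
     ("left", pvFL trees a b), ("right", pvFR trees a b)]))

def pvCell (g : List (List (PySem.Dict String Bool))) (a b : Nat) :
    Option (PySem.Dict String Bool) := (g[a]?.getD [])[b]?

def pvStep (cI cJ h : Int → Int) (key : String)
    (p : List (List (PySem.Dict String Bool)) × Int) (x : Int) :
    List (List (PySem.Dict String Bool)) × Int :=
  if h x > p.2 then (pvGset p.1 (cI x) (cJ x) key true, h x)
  else (pvGset p.1 (cI x) (cJ x) key false, p.2)

def pvG0 (trees : List (List Int)) : List (List (PySem.Dict String Bool)) :=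
  (PySem.List.pyRange 0 (PySem.List.len trees) 1).map (fun _ =>
    (PySem.List.pyRange 0 (PySem.List.len (PySem.List.pyGetD trees 0 [])) 1).map (fun _ =>
      PySem.Dict.ofList [("top", false), ("bottom", false), ("left", false), ("right", false)]))

def pvPassL (trees : List (List Int)) (g : List (List (PySem.Dict String Bool))) :
    List (List (PySem.Dict String Bool)) :=
  (PySem.List.pyRange 0 (PySem.List.len trees) 1).foldl (fun g i =>
    ((PySem.List.pyRange 1 (PySem.List.len (PySem.List.pyGetD trees 0 [])) 1).foldl
      (pvStep (fun _ => i) (fun j => j) (fun j => pvTget trees i j) "left")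
      (pvGset g i 0 "left" true, pvTget trees i 0)).1) g

def pvPassR (trees : List (List Int)) (g : List (List (PySem.Dict String Bool))) :
    List (List (PySem.Dict String Bool)) :=
  (PySem.List.pyRange 0 (PySem.List.len trees) 1).foldl (fun g i =>
    ((PySem.List.pyRange (PySem.List.len (PySem.List.pyGetD trees 0 []) - 1 - 1) (-1) (-1)).foldl
      (pvStep (fun _ => i) (fun j => j) (fun j => pvTget trees i j) "right")
      (pvGset g i (PySem.List.len (PySem.List.pyGetD trees 0 []) - 1) "right" true,
       pvTget trees i (PySem.List.len (PySem.List.pyGetD trees 0 []) - 1))).1) g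

def pvPassT (trees : List (List Int)) (g : List (List (PySem.Dict String Bool))) :
    List (List (PySem.Dict String Bool)) :=
  (PySem.List.pyRange 0 (PySem.List.len (PySem.List.pyGetD trees 0 [])) 1).foldl (fun g j =>
    ((PySem.List.pyRange 1 (PySem.List.len trees) 1).foldl
      (pvStep (fun i => i) (fun _ => j) (fun i => pvTget trees i j) "top")
      (pvGset g 0 j "top" true, pvTget trees 0 j)).1) g

def pvPassB (trees : List (List Int)) (g : List (List (PySem.Dict String Bool))) :
    List (List (PySem.Dict String Bool)) :=
  (PySem.List.pyRange 0 (PySem.List.len (PySem.List.pyGetD trees 0 [])) 1).foldl (fun g j =>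
    ((PySem.List.pyRange (PySem.List.len trees - 1 - 1) (-1) (-1)).foldl
      (pvStep (fun i => i) (fun _ => j) (fun i => pvTget trees i j) "bottom")
      (pvGset g (PySem.List.len trees - 1) j "bottom" true,
       pvTget trees (PySem.List.len trees - 1) j)).1) g

lemma get_visibility_decomp (trees : List (List Int)) :
    get_visibility trees
      = (pvPassB trees (pvPassT trees (pvPassR trees (pvPassL trees (pvG0 trees))))).map
          (fun row => row.map PySem.Dict.items) := rfl

-- ---- max facts ----

lemma foldl_max_comm (l : List Int) (a b : Int) : l.foldl max (max a b) = max (l.foldl max a) b := by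
  induction l generalizing a with
  | nil => rfl
  | cons x t ih =>
    simp only [List.foldl_cons]
    rw [show max (max a b) x = max (max a x) b by rw [max_right_comm], ih]

lemma foldl_max_reverse (l : List Int) (a : Int) : l.reverse.foldl max a = l.foldl max a := by
  induction l generalizing a with
  | nil => rfl
  | cons x t ih =>
    simp only [List.reverse_cons, List.foldl_append, List.foldl_cons, List.foldl_nil,
      foldl_max_comm, ih]

lemma pvMaxD_cons (x : Int) (r : List Int) : pvMaxD (x :: r) = r.foldl max x := rfl

lemma pvMaxD_append_singleton (l : List Int) (v : Int) : pvMaxD (l ++ [v]) = l.foldl max v := by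
  cases l with
  | nil => rfl
  | cons x t =>
    simp only [List.cons_append, pvMaxD_cons, List.foldl_append, List.foldl_cons, List.foldl_nil]
    rw [show max v x = max x v from max_comm v x, foldl_max_comm]

-- ---- cell / grid update facts ----

lemma pvCell_gset_same (g : List (List (PySem.Dict String Bool))) (i j : Int) (key : String)
    (v : Bool) (a b : Nat) (hia : i.toNat = a) (hjb : j.toNat = b) :
    pvCell (pvGset g i j key v) a b = (pvCell g a b).map (fun d => d.insert key v) := by
  subst hia hjb
  cases hg : g[i.toNat]? with
  | none => simp [pvCell, pvGset, hg]
  | some r =>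
    cases hr : r[j.toNat]? with
    | none => simp [pvCell, pvGset, hg, hr]
    | some d => simp [pvCell, pvGset, hg, hr]

lemma pvCell_gset_other (g : List (List (PySem.Dict String Bool))) (i j : Int) (key : String)
    (v : Bool) (a b : Nat) (hne : i.toNat ≠ a ∨ j.toNat ≠ b) :
    pvCell (pvGset g i j key v) a b = pvCell g a b := by
  rcases hne with h | h
  · cases hg : g[a]? with
    | none => simp [pvCell, pvGset, hg, h]
    | some r => simp [pvCell, pvGset, hg, h]
  · cases hg : g[a]? with
    | none => by_cases hi : i.toNat = a <;> simp [pvCell, pvGset, hg, hi, h]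
    | some r => by_cases hi : i.toNat = a <;> simp [pvCell, pvGset, hg, hi, h]

lemma pvFoldl_inv {σ α : Type} (val : σ → α) (f : σ → Int → σ) (l : List Int) (s : σ)
    (hp : ∀ s x, x ∈ l → val (f s x) = val s) : val (l.foldl f s) = val s := by
  induction l generalizing s with
  | nil => rfl
  | cons x t ih =>
    simp only [List.foldl_cons]
    rw [ih _ (fun s y hy => hp s y (List.mem_cons_of_mem _ hy)),
      hp s x (List.mem_cons_self)]

lemma pvStep_fst (cI cJ h : Int → Int) (key : String) (p) (x : Int) :
    (pvStep cI cJ h key p x).1 = pvGset p.1 (cI x) (cJ x) key (decide (h x > p.2)) := by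
  by_cases hc : h x > p.2 <;> simp [pvStep, hc]

lemma pvStep_snd (cI cJ h : Int → Int) (key : String) (p) (x : Int) :
    (pvStep cI cJ h key p x).2 = if h x > p.2 then h x else p.2 := by
  by_cases hc : h x > p.2 <;> simp [pvStep, hc]

lemma pvCell_fold_untouched (cI cJ h : Int → Int) (key : String) (l : List Int)
    (p : List (List (PySem.Dict String Bool)) × Int) (a b : Nat)
    (hne : ∀ x ∈ l, (cI x).toNat ≠ a ∨ (cJ x).toNat ≠ b) :
    pvCell (l.foldl (pvStep cI cJ h key) p).1 a b = pvCell p.1 a b := by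
  refine pvFoldl_inv (fun q => pvCell q.1 a b) _ l p (fun q x hx => ?_)
  beta_reduce
  rw [pvStep_fst]
  exact pvCell_gset_other _ _ _ _ _ _ _ (hne x hx)

lemma pvCell_split (cI cJ h : Int → Int) (key : String) (pre post : List Int) (j : Int)
    (g : List (List (PySem.Dict String Bool))) (m : Int) (a b : Nat)
    (hja : (cI j).toNat = a) (hjb : (cJ j).toNat = b)
    (hpre : ∀ x ∈ pre, (cI x).toNat ≠ a ∨ (cJ x).toNat ≠ b)
    (hpost : ∀ x ∈ post, (cI x).toNat ≠ a ∨ (cJ x).toNat ≠ b) :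
    pvCell ((pre ++ j :: post).foldl (pvStep cI cJ h key) (g, m)).1 a b
      = (pvCell g a b).map
          (fun d => d.insert key
            (decide (h j > pre.foldl (fun m x => if h x > m then h x else m) m))) := by
  induction pre generalizing g m with
  | nil =>
    simp only [List.nil_append, List.foldl_cons, List.foldl_nil]
    rw [pvCell_fold_untouched _ _ _ _ _ _ _ _ hpost, pvStep_fst,
      pvCell_gset_same _ _ _ _ _ _ _ hja hjb]
    rfl
  | cons x pre' ih =>
    simp only [List.cons_append, List.foldl_cons]
    rw [ih (pvStep cI cJ h key (g, m) x).1 (pvStep cI cJ h key (g, m) x).2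
      (fun y hy => hpre y (List.mem_cons_of_mem _ hy)),
      pvStep_fst, pvCell_gset_other _ _ _ _ _ _ _ (hpre x List.mem_cons_self),
      pvStep_snd]
    rfl

-- ---- shape preservation ----

lemma pvGset_length (g : List (List (PySem.Dict String Bool))) (i j : Int) (key : String)
    (v : Bool) : (pvGset g i j key v).length = g.length := by
  simp [pvGset]

lemma pvGset_rowlen (g : List (List (PySem.Dict String Bool))) (i j : Int) (key : String)
    (v : Bool) (a : Nat) :
    ((pvGset g i j key v)[a]?.getD []).length = (g[a]?.getD []).length := by
  simp only [pvGset, List.getElem?_modify]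
  cases g[a]? with
  | none => by_cases hi : i.toNat = a <;> simp [hi]
  | some r => by_cases hi : i.toNat = a <;> simp [hi]

lemma pvStepFold_fst_length (cI cJ h : Int → Int) (key : String) (l : List Int) (p) :
    ((l.foldl (pvStep cI cJ h key) p).1).length = p.1.length := by
  refine pvFoldl_inv (fun q => q.1.length) _ l p (fun q x _ => ?_)
  beta_reduce
  rw [pvStep_fst, pvGset_length]

lemma pvStepFold_fst_rowlen (cI cJ h : Int → Int) (key : String) (l : List Int) (p) (a : Nat) :
    (((l.foldl (pvStep cI cJ h key) p).1)[a]?.getD []).length = (p.1[a]?.getD []).length := by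
  refine pvFoldl_inv (fun q => (q.1[a]?.getD []).length) _ l p (fun q x _ => ?_)
  beta_reduce
  rw [pvStep_fst, pvGset_rowlen]

lemma pvPass_length (trees : List (List Int)) (g : List (List (PySem.Dict String Bool))) :
    (pvPassL trees g).length = g.length ∧ (pvPassR trees g).length = g.length ∧
    (pvPassT trees g).length = g.length ∧ (pvPassB trees g).length = g.length := by
  refine ⟨?_, ?_, ?_, ?_⟩ <;>
    [unfold pvPassL; unfold pvPassR; unfold pvPassT; unfold pvPassB] <;>
    · refine pvFoldl_inv List.length _ _ g (fun s x _ => ?_)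
      beta_reduce
      rw [pvStepFold_fst_length]
      exact pvGset_length ..

lemma pvPass_rowlen (trees : List (List Int)) (g : List (List (PySem.Dict String Bool)))
    (a : Nat) :
    ((pvPassL trees g)[a]?.getD []).length = (g[a]?.getD []).length ∧
    ((pvPassR trees g)[a]?.getD []).length = (g[a]?.getD []).length ∧
    ((pvPassT trees g)[a]?.getD []).length = (g[a]?.getD []).length ∧
    ((pvPassB trees g)[a]?.getD []).length = (g[a]?.getD []).length := by
  refine ⟨?_, ?_, ?_, ?_⟩ <;>
    [unfold pvPassL; unfold pvPassR; unfold pvPassT; unfold pvPassB] <;>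
    · refine pvFoldl_inv (fun g => (g[a]?.getD []).length) _ _ g (fun s x _ => ?_)
      beta_reduce
      rw [pvStepFold_fst_rowlen]
      exact pvGset_rowlen ..

-- ---- the outer loop touches a given cell in exactly one iteration ----

lemma pvOuter_cell {a b : Nat} (N : Int)
    (body : List (List (PySem.Dict String Bool)) → Int → List (List (PySem.Dict String Bool)))
    (g : List (List (PySem.Dict String Bool))) (i0 : Nat)
    (f : PySem.Dict String Bool → PySem.Dict String Bool) (hN : (i0 : Int) < N)
    (houter : ∀ g x, 0 ≤ x → x < N → x ≠ (i0 : Int) → pvCell (body g x) a b = pvCell g a b)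
    (hbody : ∀ g, pvCell (body g (i0 : Int)) a b = (pvCell g a b).map f) :
    pvCell ((PySem.List.pyRange 0 N 1).foldl body g) a b = (pvCell g a b).map f := by
  rw [PySem.List.pyRange_one_append 0 (i0 : Int) N (by positivity) (le_of_lt hN),
    PySem.List.pyRange_one_cons hN, List.foldl_append, List.foldl_cons]
  rw [pvFoldl_inv (fun g => pvCell g a b) body _ _ (fun s x hx => by
    have hm := PySem.List.mem_pyRange_one.mp hx
    exact houter s x (by omega) (by omega) (by omega))]
  rw [hbody, pvFoldl_inv (fun g => pvCell g a b) body _ g (fun s x hx => by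
    have hm := PySem.List.mem_pyRange_one.mp hx
    exact houter s x (by omega) (by omega) (by omega))]

-- ---- running max = segment max ----

lemma pvRun_eq_max (h : Int → Int) (l : List Int) (m : Int) :
    l.foldl (fun m x => if h x > m then h x else m) m = (l.map h).foldl max m := by
  induction l generalizing m with
  | nil => rfl
  | cons x t ih =>
    simp only [List.foldl_cons, List.map_cons]
    rw [ih]
    congr 1
    by_cases hc : h x > m
    · rw [if_pos hc, max_eq_right hc.le]
    · rw [if_neg hc, max_eq_left (not_lt.mp hc)]

lemma pvMapRange (xs : List Int) (d : Int) (s e : Nat) (he : e ≤ xs.length) :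
    (PySem.List.pyRange (s : Int) (e : Int) 1).map (fun k => PySem.List.pyGetD xs k d)
      = (xs.take e).drop s := by
  induction e with
  | zero =>
    rw [PySem.List.pyRange_one_eq_nil (by positivity)]
    simp
  | succ e ih =>
    by_cases hse : e < s
    · rw [PySem.List.pyRange_one_eq_nil (by exact_mod_cast hse)]
      rw [List.map_nil, eq_comm, List.drop_eq_nil_iff]
      simp only [List.length_take]
      omega
    · have he' : e < xs.length := by omega
      rw [show ((e + 1 : Nat) : Int) = (e : Int) + 1 by push_cast; ring,
        PySem.List.pyRange_one_succ_right (by exact_mod_cast not_lt.mp hse),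
        List.map_append, ih (by omega), List.take_succ, List.getElem?_eq_getElem he',
        List.drop_append_of_le_length (by simp [List.length_take]; omega)]
      simp [PySem.List.pyGetD_natCast, List.getD_eq_getElem?_getD, List.getElem?_eq_getElem he']

lemma pvSegMaxL (xs : List Int) (e : Nat) (h1 : 1 ≤ e) (he : e ≤ xs.length) :
    ((xs.take e).drop 1).foldl max (xs.getD 0 0) = pvMaxD (xs.take e) := by
  cases xs with
  | nil => simp at he; omega
  | cons x t =>
    cases e with
    | zero => omega
    | succ e => simp [List.take_succ_cons, pvMaxD_cons]

lemma pvSegMaxR (xs : List Int) (c k : Nat) (hc : c ≤ xs.length) (hc0 : 0 < c)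
    (hk : k + 1 ≤ c - 1) :
    ((xs.take (c - 1)).drop (k + 1)).foldl max (xs.getD (c - 1) 0)
      = pvMaxD ((xs.take c).drop (k + 1)) := by
  have hlt : c - 1 < xs.length := by omega
  have hsplit : xs.take c = xs.take (c - 1) ++ [xs[c - 1]] := by
    conv_lhs => rw [show c = (c - 1) + 1 by omega]
    rw [List.take_succ, List.getElem?_eq_getElem hlt]
    rfl
  rw [hsplit, List.drop_append_of_le_length (by simp [List.length_take]; omega),
    pvMaxD_append_singleton, List.getD_eq_getElem xs 0 hlt]

-- ---- countdown range split ----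

lemma pvRangeRev (c : Nat) (hc : 0 < c) :
    PySem.List.pyRange ((c : Int) - 1 - 1) (-1) (-1) = (PySem.List.pyRange 0 ((c : Int) - 1) 1).reverse := by
  rw [PySem.List.pyRange_neg_one_eq_reverse]
  norm_num

lemma pvRangeRevSplit (c k : Nat) (hc : 0 < c) (hk : k < c - 1) :
    PySem.List.pyRange ((c : Int) - 1 - 1) (-1) (-1)
      = (PySem.List.pyRange ((k : Int) + 1) ((c : Int) - 1) 1).reverse
        ++ (k : Int) :: (PySem.List.pyRange 0 (k : Int) 1).reverse := by
  rw [pvRangeRev c hc,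
    PySem.List.pyRange_one_append 0 ((k : Int) + 1) ((c : Int) - 1) (by omega) (by omega),
    PySem.List.pyRange_one_succ_right (by omega : (0 : Int) ≤ (k : Int)),
    List.reverse_append, List.reverse_append]
  simp

-- ---- reading trees through pvTget ----

lemma pvTget_row (trees : List (List Int)) (a : Nat) (x : Int) :
    pvTget trees (a : Int) x = PySem.List.pyGetD (trees.getD a []) x 0 := by
  rw [pvTget, PySem.List.pyGetD_natCast]

lemma pvTget_col (trees : List (List Int)) (b : Nat) (x : Int) (h0 : 0 ≤ x)
    (hx : x < (trees.length : Int)) :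
    pvTget trees x (b : Int) = PySem.List.pyGetD (pvColL trees b) x 0 := by
  rw [pvTget, PySem.List.pyGetD_eq_getElem trees [] h0 (by exact_mod_cast hx),
    PySem.List.pyGetD_natCast, pvColL,
    PySem.List.pyGetD_eq_getElem _ 0 h0 (by rw [List.length_map]; exact_mod_cast hx),
    List.getElem_map]

lemma pvT_eq (trees : List (List Int)) (a b : Nat) :
    pvTget trees (a : Int) (b : Int) = pvT trees a b := by
  rw [pvTget_row, PySem.List.pyGetD_natCast, pvT]

-- ---- the four pass-cell lemmas ----

lemma pvMapRange' (xs : List Int) (d : Int) (s e : Int) (hs : 0 ≤ s) (he0 : 0 ≤ e)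
    (he : e ≤ (xs.length : Int)) :
    (PySem.List.pyRange s e 1).map (fun k => PySem.List.pyGetD xs k d)
      = (xs.take e.toNat).drop s.toNat := by
  obtain ⟨sn, rfl⟩ : ∃ n : Nat, s = (n : Int) := ⟨s.toNat, (Int.toNat_of_nonneg hs).symm⟩
  obtain ⟨en, rfl⟩ : ∃ n : Nat, e = (n : Int) := ⟨e.toNat, (Int.toNat_of_nonneg he0).symm⟩
  rw [pvMapRange xs d sn en (by exact_mod_cast he)]
  simp

lemma pvPassL_cell (trees : List (List Int)) (g : List (List (PySem.Dict String Bool)))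
    (a b : Nat) (ha : a < trees.length) (hb : b < pvCols trees)
    (hlen : ∀ row ∈ trees, pvCols trees ≤ row.length) :
    pvCell (pvPassL trees g) a b
      = (pvCell g a b).map (fun d => d.insert "left" (pvFL trees a b)) := by
  have hrlen : pvCols trees ≤ (trees.getD a []).length :=
    hlen _ (by rw [List.getD_eq_getElem _ _ ha]; exact List.getElem_mem _)
  unfold pvPassL
  rw [PySem.List.len_eq, PySem.List.len_eq,
    show (PySem.List.pyGetD trees 0 []).length = pvCols trees from rfl]
  refine pvOuter_cell _ _ g a _ (by exact_mod_cast ha) ?_ ?_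
  · intro g' x hx0 hxN hxne
    rw [pvCell_fold_untouched (fun _ => x) (fun j => j) (fun j => pvTget trees x j) "left" _ _
        a b (fun y hy => Or.inl (by beta_reduce; omega))]
    exact pvCell_gset_other _ _ _ _ _ _ _ (Or.inl (by omega))
  · intro g'
    by_cases hb0 : b = 0
    · subst hb0
      rw [pvCell_fold_untouched (fun _ => ((a : Nat) : Int)) (fun j => j)
          (fun j => pvTget trees ((a : Nat) : Int) j) "left" _ _ a 0 (fun y hy => by
            have hm := PySem.List.mem_pyRange_one.mp hy
            exact Or.inr (by beta_reduce; omega))]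
      rw [pvCell_gset_same _ _ _ _ _ _ _ (by omega) (by omega)]
      simp [pvFL]
    · have h1b : 1 ≤ b := Nat.one_le_iff_ne_zero.mpr hb0
      rw [PySem.List.pyRange_one_append 1 (b : Int) (pvCols trees : Int) (by omega) (by omega),
        PySem.List.pyRange_one_cons (show (b : Int) < (pvCols trees : Int) by exact_mod_cast hb),
        pvCell_split (fun _ => ((a : Nat) : Int)) (fun j => j)
          (fun j => pvTget trees ((a : Nat) : Int) j) "left"
          (PySem.List.pyRange 1 (b : Int)) (PySem.List.pyRange ((b : Int) + 1) (pvCols trees : Int))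
          (b : Int) _ _ a b (by show ((a : Nat) : Int).toNat = a; omega)
          (by show ((b : Nat) : Int).toNat = b; omega)
          (fun y hy => by
            have hm := PySem.List.mem_pyRange_one.mp hy
            exact Or.inr (by beta_reduce; omega))
          (fun y hy => by
            have hm := PySem.List.mem_pyRange_one.mp hy
            exact Or.inr (by beta_reduce; omega))]
      rw [pvCell_gset_other _ _ _ _ _ _ _ (Or.inr (by omega))]
      have hflag : pvFL trees a b
          = decide (pvT trees a b > pvMaxD ((trees.getD a []).take b)) := by
        simp [pvFL, hb0]
      rw [hflag]
      congr 1
      funext d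
      congr 1
      rw [decide_eq_decide, pvT_eq, pvRun_eq_max (fun j => pvTget trees (a : Int) j)]
      simp only [pvTget_row]
      rw [pvMapRange' _ 0 1 (b : Int) (by norm_num) (by positivity) (by omega),
        show (1 : Int).toNat = 1 from rfl,
        show ((b : Nat) : Int).toNat = b by omega,
        show PySem.List.pyGetD (trees.getD a []) 0 0 = (trees.getD a []).getD 0 0 from
          PySem.List.pyGetD_zero _ _,
        pvSegMaxL _ b h1b (by omega)]

lemma pvPassT_cell (trees : List (List Int)) (g : List (List (PySem.Dict String Bool)))
    (a b : Nat) (ha : a < trees.length) (hb : b < pvCols trees) :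
    pvCell (pvPassT trees g) a b
      = (pvCell g a b).map (fun d => d.insert "top" (pvFT trees a b)) := by
  have hclen : (pvColL trees b).length = trees.length := List.length_map ..
  unfold pvPassT
  rw [PySem.List.len_eq, PySem.List.len_eq,
    show (PySem.List.pyGetD trees 0 []).length = pvCols trees from rfl]
  refine pvOuter_cell _ _ g b _ (by exact_mod_cast hb) ?_ ?_
  · intro g' x hx0 hxN hxne
    rw [pvCell_fold_untouched (fun i => i) (fun _ => x) (fun i => pvTget trees i x) "top" _ _
        a b (fun y hy => Or.inr (by beta_reduce; omega))]
    exact pvCell_gset_other _ _ _ _ _ _ _ (Or.inr (by omega))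
  · intro g'
    by_cases ha0 : a = 0
    · subst ha0
      rw [pvCell_fold_untouched (fun i => i) (fun _ => ((b : Nat) : Int))
          (fun i => pvTget trees i ((b : Nat) : Int)) "top" _ _ 0 b (fun y hy => by
            have hm := PySem.List.mem_pyRange_one.mp hy
            exact Or.inl (by beta_reduce; omega))]
      rw [pvCell_gset_same _ _ _ _ _ _ _ (by omega) (by omega)]
      simp [pvFT]
    · have h1a : 1 ≤ a := Nat.one_le_iff_ne_zero.mpr ha0
      rw [PySem.List.pyRange_one_append 1 (a : Int) (trees.length : Int) (by omega) (by omega),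
        PySem.List.pyRange_one_cons (show (a : Int) < (trees.length : Int) by exact_mod_cast ha),
        pvCell_split (fun i => i) (fun _ => ((b : Nat) : Int))
          (fun i => pvTget trees i ((b : Nat) : Int)) "top"
          (PySem.List.pyRange 1 (a : Int)) (PySem.List.pyRange ((a : Int) + 1) (trees.length : Int))
          (a : Int) _ _ a b (by show ((a : Nat) : Int).toNat = a; omega)
          (by show ((b : Nat) : Int).toNat = b; omega)
          (fun y hy => by
            have hm := PySem.List.mem_pyRange_one.mp hy
            exact Or.inl (by beta_reduce; omega))
          (fun y hy => by
            have hm := PySem.List.mem_pyRange_one.mp hy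
            exact Or.inl (by beta_reduce; omega))]
      rw [pvCell_gset_other _ _ _ _ _ _ _ (Or.inl (by omega))]
      have hflag : pvFT trees a b
          = decide (pvT trees a b > pvMaxD ((pvColL trees b).take a)) := by
        simp [pvFT, ha0]
      rw [hflag]
      congr 1
      funext d
      congr 1
      rw [decide_eq_decide, pvT_eq, pvRun_eq_max (fun i => pvTget trees i (b : Int))]
      rw [List.map_congr_left (fun x hx => by
        have hm := PySem.List.mem_pyRange_one.mp hx
        exact pvTget_col trees b x (by omega) (by omega))]
      rw [pvMapRange' _ 0 1 (a : Int) (by norm_num) (by positivity) (by rw [hclen]; omega),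
        show (1 : Int).toNat = 1 from rfl,
        show ((a : Nat) : Int).toNat = a by omega,
        pvTget_col trees b 0 le_rfl (by omega),
        show PySem.List.pyGetD (pvColL trees b) 0 0 = (pvColL trees b).getD 0 0 from
          PySem.List.pyGetD_zero _ _,
        pvSegMaxL _ a h1a (by omega)]

lemma pvPassR_cell (trees : List (List Int)) (g : List (List (PySem.Dict String Bool)))
    (a b : Nat) (ha : a < trees.length) (hb : b < pvCols trees) (hc0 : 0 < pvCols trees)
    (hlen : ∀ row ∈ trees, pvCols trees ≤ row.length) :
    pvCell (pvPassR trees g) a b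
      = (pvCell g a b).map (fun d => d.insert "right" (pvFR trees a b)) := by
  have hrlen : pvCols trees ≤ (trees.getD a []).length :=
    hlen _ (by rw [List.getD_eq_getElem _ _ ha]; exact List.getElem_mem _)
  unfold pvPassR
  rw [PySem.List.len_eq, PySem.List.len_eq,
    show (PySem.List.pyGetD trees 0 []).length = pvCols trees from rfl]
  refine pvOuter_cell _ _ g a _ (by exact_mod_cast ha) ?_ ?_
  · intro g' x hx0 hxN hxne
    rw [pvCell_fold_untouched (fun _ => x) (fun j => j) (fun j => pvTget trees x j) "right" _ _
        a b (fun y hy => Or.inl (by beta_reduce; omega))]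
    exact pvCell_gset_other _ _ _ _ _ _ _ (Or.inl (by omega))
  · intro g'
    by_cases hbc : b = pvCols trees - 1
    · rw [pvCell_fold_untouched (fun _ => ((a : Nat) : Int)) (fun j => j)
          (fun j => pvTget trees ((a : Nat) : Int) j) "right" _ _ a b (fun y hy => by
            rw [pvRangeRev _ hc0] at hy
            have hm := PySem.List.mem_pyRange_one.mp (List.mem_reverse.mp hy)
            exact Or.inr (by beta_reduce; omega))]
      rw [pvCell_gset_same _ _ _ _ _ _ _ (by omega) (by omega)]
      have hfr : pvFR trees a b = true := by simp [pvFR, hbc]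
      rw [hfr]
    · have hblt : b < pvCols trees - 1 := by omega
      rw [pvRangeRevSplit (pvCols trees) b hc0 hblt,
        pvCell_split (fun _ => ((a : Nat) : Int)) (fun j => j)
          (fun j => pvTget trees ((a : Nat) : Int) j) "right"
          ((PySem.List.pyRange ((b : Int) + 1) ((pvCols trees : Int) - 1)).reverse)
          ((PySem.List.pyRange 0 (b : Int)).reverse)
          (b : Int) _ _ a b (by show ((a : Nat) : Int).toNat = a; omega)
          (by show ((b : Nat) : Int).toNat = b; omega)
          (fun y hy => by
            have hm := PySem.List.mem_pyRange_one.mp (List.mem_reverse.mp hy)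
            exact Or.inr (by beta_reduce; omega))
          (fun y hy => by
            have hm := PySem.List.mem_pyRange_one.mp (List.mem_reverse.mp hy)
            exact Or.inr (by beta_reduce; omega))]
      rw [pvCell_gset_other _ _ _ _ _ _ _ (Or.inr (by omega))]
      have hflag : pvFR trees a b = decide (pvT trees a b
          > pvMaxD (((trees.getD a []).take (pvCols trees)).drop (b + 1))) := by
        simp [pvFR, hbc]
      rw [hflag]
      congr 1
      funext d
      congr 1
      rw [decide_eq_decide, pvT_eq, pvRun_eq_max (fun j => pvTget trees (a : Int) j)]
      simp only [pvTget_row]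
      rw [List.map_reverse, foldl_max_reverse,
        pvMapRange' _ 0 ((b : Int) + 1) ((pvCols trees : Int) - 1) (by omega) (by omega)
          (by omega),
        show ((b : Int) + 1).toNat = b + 1 by omega,
        show ((pvCols trees : Int) - 1).toNat = pvCols trees - 1 by omega,
        show ((pvCols trees : Int) - 1) = (((pvCols trees - 1 : Nat)) : Int) by omega,
        show PySem.List.pyGetD (trees.getD a []) (((pvCols trees - 1 : Nat)) : Int) 0
            = (trees.getD a []).getD (pvCols trees - 1) 0 from PySem.List.pyGetD_natCast _ _ _,
        pvSegMaxR _ (pvCols trees) b (by omega) hc0 (by omega)]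

lemma pvPassB_cell (trees : List (List Int)) (g : List (List (PySem.Dict String Bool)))
    (a b : Nat) (ha : a < trees.length) (hb : b < pvCols trees) (hr0 : 0 < trees.length) :
    pvCell (pvPassB trees g) a b
      = (pvCell g a b).map (fun d => d.insert "bottom" (pvFB trees a b)) := by
  have hclen : (pvColL trees b).length = trees.length := List.length_map ..
  unfold pvPassB
  rw [PySem.List.len_eq, PySem.List.len_eq,
    show (PySem.List.pyGetD trees 0 []).length = pvCols trees from rfl]
  refine pvOuter_cell _ _ g b _ (by exact_mod_cast hb) ?_ ?_
  · intro g' x hx0 hxN hxne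
    rw [pvCell_fold_untouched (fun i => i) (fun _ => x) (fun i => pvTget trees i x) "bottom" _ _
        a b (fun y hy => Or.inr (by beta_reduce; omega))]
    exact pvCell_gset_other _ _ _ _ _ _ _ (Or.inr (by omega))
  · intro g'
    by_cases har : a = trees.length - 1
    · rw [pvCell_fold_untouched (fun i => i) (fun _ => ((b : Nat) : Int))
          (fun i => pvTget trees i ((b : Nat) : Int)) "bottom" _ _ a b (fun y hy => by
            rw [pvRangeRev _ hr0] at hy
            have hm := PySem.List.mem_pyRange_one.mp (List.mem_reverse.mp hy)
            exact Or.inl (by beta_reduce; omega))]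
      rw [pvCell_gset_same _ _ _ _ _ _ _ (by omega) (by omega)]
      have hfb : pvFB trees a b = true := by simp [pvFB, har]
      rw [hfb]
    · have halt : a < trees.length - 1 := by omega
      rw [pvRangeRevSplit trees.length a hr0 halt,
        pvCell_split (fun i => i) (fun _ => ((b : Nat) : Int))
          (fun i => pvTget trees i ((b : Nat) : Int)) "bottom"
          ((PySem.List.pyRange ((a : Int) + 1) ((trees.length : Int) - 1)).reverse)
          ((PySem.List.pyRange 0 (a : Int)).reverse)
          (a : Int) _ _ a b (by show ((a : Nat) : Int).toNat = a; omega)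
          (by show ((b : Nat) : Int).toNat = b; omega)
          (fun y hy => by
            have hm := PySem.List.mem_pyRange_one.mp (List.mem_reverse.mp hy)
            exact Or.inl (by beta_reduce; omega))
          (fun y hy => by
            have hm := PySem.List.mem_pyRange_one.mp (List.mem_reverse.mp hy)
            exact Or.inl (by beta_reduce; omega))]
      rw [pvCell_gset_other _ _ _ _ _ _ _ (Or.inl (by omega))]
      have hflag : pvFB trees a b
          = decide (pvT trees a b > pvMaxD ((pvColL trees b).drop (a + 1))) := by
        simp [pvFB, har]
      rw [hflag]
      congr 1
      funext d
      congr 1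
      rw [decide_eq_decide, pvT_eq, pvRun_eq_max (fun i => pvTget trees i (b : Int))]
      rw [List.map_reverse,
        List.map_congr_left (fun x hx => by
          have hm := PySem.List.mem_pyRange_one.mp hx
          exact pvTget_col trees b x (by omega) (by omega)),
        foldl_max_reverse,
        pvMapRange' _ 0 ((a : Int) + 1) ((trees.length : Int) - 1) (by omega) (by omega)
          (by rw [hclen]; omega),
        show ((a : Int) + 1).toNat = a + 1 by omega,
        show ((trees.length : Int) - 1).toNat = trees.length - 1 by omega,
        show ((trees.length : Int) - 1) = (((trees.length - 1 : Nat)) : Int) by omega,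
        pvTget_col trees b (((trees.length - 1 : Nat)) : Int) (by omega) (by omega),
        show PySem.List.pyGetD (pvColL trees b) (((trees.length - 1 : Nat)) : Int) 0
            = (pvColL trees b).getD (trees.length - 1) 0 from PySem.List.pyGetD_natCast _ _ _,
        pvSegMaxR _ trees.length a (by omega) hr0 (by omega),
        show (pvColL trees b).take trees.length = pvColL trees b by
          rw [← hclen]; exact List.take_length ..]

-- ---- the initial grid ----

lemma pvMapConstRange {α : Type} (k : Nat) (c : α) :
    (PySem.List.pyRange 0 (k : Int)).map (fun _ => c) = List.replicate k c := by
  rw [PySem.List.pyRange_one]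
  simp [Function.comp_def, List.map_const']

lemma pvG0_eq (trees : List (List Int)) :
    pvG0 trees = List.replicate trees.length (List.replicate (pvCols trees)
      (PySem.Dict.ofList [("top", false), ("bottom", false), ("left", false), ("right", false)])) := by
  simp only [pvG0, PySem.List.len_eq,
    show (PySem.List.pyGetD trees 0 []).length = pvCols trees from rfl, pvMapConstRange]

lemma pvG0_length (trees : List (List Int)) : (pvG0 trees).length = trees.length := by
  simp [pvG0_eq]

lemma pvG0_rowlen (trees : List (List Int)) (a : Nat) (ha : a < trees.length) :
    ((pvG0 trees)[a]?.getD []).length = pvCols trees := by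
  simp [pvG0_eq, ha]

lemma pvG0_cell (trees : List (List Int)) (a b : Nat) (ha : a < trees.length)
    (hb : b < pvCols trees) :
    pvCell (pvG0 trees) a b
      = some (PySem.Dict.ofList
          [("top", false), ("bottom", false), ("left", false), ("right", false)]) := by
  simp [pvCell, pvG0_eq, ha, hb]

-- ---- A reduces to the normal form ----

lemma pvA_norm (trees : List (List Int)) (hpre : Pre_get_visibility trees) :
    get_visibility trees = pvRHS trees := by
  obtain ⟨hne, hc0, hlen⟩ := hpre
  have hr0 : 0 < trees.length := List.length_pos_of_ne_nil hne
  have hc0' : 0 < pvCols trees := hc0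
  have hlen' : ∀ row ∈ trees, pvCols trees ≤ row.length := hlen
  rw [get_visibility_decomp]
  set G1 := pvPassL trees (pvG0 trees) with hG1
  set G2 := pvPassR trees G1 with hG2
  set G3 := pvPassT trees G2 with hG3
  set G4 := pvPassB trees G3 with hG4
  have hL4 : G4.length = trees.length := by
    rw [hG4, (pvPass_length trees G3).2.2.2, hG3, (pvPass_length trees G2).2.2.1,
      hG2, (pvPass_length trees G1).2.1, hG1, (pvPass_length trees _).1, pvG0_length]
  have hRL4 : ∀ a : Nat, a < trees.length → (G4[a]?.getD []).length = pvCols trees := by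
    intro a ha
    rw [hG4, (pvPass_rowlen trees G3 a).2.2.2, hG3, (pvPass_rowlen trees G2 a).2.2.1,
      hG2, (pvPass_rowlen trees G1 a).2.1, hG1, (pvPass_rowlen trees _ a).1,
      pvG0_rowlen trees a ha]
  have hCell : ∀ a b : Nat, a < trees.length → b < pvCols trees →
      pvCell G4 a b = some (PySem.Dict.ofList
        [("top", pvFT trees a b), ("bottom", pvFB trees a b),
         ("left", pvFL trees a b), ("right", pvFR trees a b)]) := by
    intro a b ha hb
    rw [hG4, pvPassB_cell trees G3 a b ha hb hr0, hG3, pvPassT_cell trees G2 a b ha hb,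
      hG2, pvPassR_cell trees G1 a b ha hb hc0' hlen', hG1,
      pvPassL_cell trees _ a b ha hb hlen', pvG0_cell trees a b ha hb]
    simp only [Option.map_some]
    rfl
  apply List.ext_getElem?
  intro a
  rw [List.getElem?_map, pvRHS, List.getElem?_map]
  by_cases ha : a < trees.length
  · rw [List.getElem?_eq_getElem (by rw [hL4]; exact ha),
      List.getElem?_eq_getElem (by simpa using ha)]
    simp only [Option.map_some, List.getElem_range]
    congr 1
    have hrowa : G4[a]?.getD [] = G4[a] := by
      rw [List.getElem?_eq_getElem (by rw [hL4]; exact ha)]; rfl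
    apply List.ext_getElem?
    intro b
    rw [List.getElem?_map, List.getElem?_map]
    by_cases hb : b < pvCols trees
    · have hcb : G4[a][b]? = pvCell G4 a b := by rw [pvCell, hrowa]
      rw [hcb, hCell a b ha hb,
        List.getElem?_eq_getElem (by simpa using hb)]
      simp only [Option.map_some, List.getElem_range]
      rfl
    · have h1 : G4[a][b]? = none := by
        rw [List.getElem?_eq_none_iff]
        have := hRL4 a ha
        rw [hrowa] at this
        omega
      rw [h1, List.getElem?_eq_none_iff.mpr (by simpa using not_lt.mp hb)]
      rfl
  · rw [List.getElem?_eq_none_iff.mpr (by rw [hL4]; omega),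
      List.getElem?_eq_none_iff.mpr (by simpa using not_lt.mp ha)]
    rfl

-- ---- B reduces to the normal form ----

lemma foldl_max_lt (t : List Int) (x h : Int) :
    (t.foldl max x < h) ↔ (x < h ∧ ∀ y ∈ t, y < h) := by
  induction t generalizing x with
  | nil => simp
  | cons y t ih =>
    simp only [List.foldl_cons, ih, max_lt_iff, List.forall_mem_cons]
    all_goals tauto

-- all(x < h) over a list equals "empty, or h exceeds the maximum"
lemma pvTaller_eq (h : Int) (l : List Int) :
    pvTaller h l = ((l.length == 0) || decide (h > pvMaxD l)) := by
  cases l with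
  | nil => simp [pvTaller]
  | cons x t =>
    rw [Bool.eq_iff_iff]
    simp only [pvTaller, List.all_eq_true, decide_eq_true_eq, List.length_cons,
      beq_iff_eq, Bool.or_eq_true, pvMaxD_cons, gt_iff_lt, foldl_max_lt,
      List.forall_mem_cons, Nat.succ_ne_zero, false_or]

lemma pvMapRangeTake {α β : Type} (f : α → β) (l : List α) (d : α) (a : Nat)
    (ha : a ≤ l.length) :
    (List.range a).map (fun k => f (l.getD k d)) = (l.map f).take a := by
  apply List.ext_getElem
  · simp [ha]
  · intro i h1 h2
    simp only [List.getElem_map, List.getElem_range, List.getElem_take]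
    rw [List.getD_eq_getElem _ _ (by simp at h1; omega)]

lemma pvMapRangeDrop {α β : Type} (f : α → β) (l : List α) (d : α) (s : Nat)
    (hs : s ≤ l.length) :
    (List.range' s (l.length - s)).map (fun k => f (l.getD k d)) = (l.map f).drop s := by
  apply List.ext_getElem
  · simp [List.length_range']
  · intro i h1 h2
    simp only [List.getElem_map, List.getElem_range', List.getElem_drop, one_mul]
    rw [List.getD_eq_getElem _ _ (by simp [List.length_range'] at h1; omega)]

lemma pvB_norm (trees : List (List Int)) (hpre : Pre_get_visibility trees) :
    get_visibility_alt trees = pvRHS trees := by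
  obtain ⟨hne, hc0, hlen⟩ := hpre
  have hr0 : 0 < trees.length := List.length_pos_of_ne_nil hne
  have hc0' : 0 < pvCols trees := hc0
  simp only [get_visibility_alt, pvRHS,
    show (PySem.List.pyGetD trees 0 []).length = pvCols trees from rfl]
  refine List.map_congr_left (fun a hA => ?_)
  have ha : a < trees.length := List.mem_range.mp hA
  refine List.map_congr_left (fun b hB => ?_)
  have hb : b < pvCols trees := List.mem_range.mp hB
  have hrlen : pvCols trees ≤ (trees.getD a []).length :=
    hlen _ (by rw [List.getD_eq_getElem _ _ ha]; exact List.getElem_mem _)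
  have hclen : (pvColL trees b).length = trees.length := List.length_map ..
  have hh : (trees.getD a []).getD b 0 = pvT trees a b := rfl
  congr 1
  · -- top
    congr 1
    rw [hh, pvMapRangeTake (fun row => row.getD b 0) trees [] a ha.le, ← pvColL,
      pvTaller_eq, pvFT, Bool.eq_iff_iff]
    simp only [Bool.or_eq_true, beq_iff_eq, decide_eq_true_eq, List.length_take, hclen]
    rw [show (min a trees.length = 0) ↔ (a = 0) from by omega]
  congr 1
  · -- bottom
    congr 1
    rw [hh, pvMapRangeDrop (fun row => row.getD b 0) trees [] (a + 1) (by omega), ← pvColL,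
      pvTaller_eq, pvFB, Bool.eq_iff_iff]
    simp only [Bool.or_eq_true, beq_iff_eq, decide_eq_true_eq, List.length_drop, hclen]
    rw [show (trees.length - (a + 1) = 0) ↔ (a = trees.length - 1) from by omega]
  congr 1
  · -- left
    congr 1
    rw [hh, pvTaller_eq, pvFL, Bool.eq_iff_iff]
    simp only [Bool.or_eq_true, beq_iff_eq, decide_eq_true_eq, List.length_take]
    rw [show (min b (trees.getD a []).length = 0) ↔ (b = 0) from by omega]
  · -- right
    congr 1
    congr 1
    rw [hh, pvTaller_eq, pvFR, Bool.eq_iff_iff]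
    simp only [Bool.or_eq_true, beq_iff_eq, decide_eq_true_eq, List.length_drop,
      List.length_take]
    rw [show (min (pvCols trees) (trees.getD a []).length - (b + 1) = 0)
        ↔ (b = pvCols trees - 1) from by omega]

-- ===== VERDICT (by name: the statement is the Claim_ definition above) =====
theorem get_visibility_spec : Claim_equal_get_visibility := by
  intro trees hdom hpre
  unfold Spec_get_visibility
  rw [pvA_norm trees hpre, pvB_norm trees hpre]
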